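-- pv_equiv track=rewrite | github.com/argriffing/khatrisvd | khatrisvd/heatmap.py | get_newick_order
-- ===== SOURCE A (Python) =====
-- def get_newick_order(s):
--     """
--     Extract a permutation from a newick string.
--     @param s: a newick string
--     @return: a permutation of the first N nonnegative integers
--     """
--     # first change every nondigit value in s to a space
--     lex = []
--     for c in s:
--         if c not in '0123456789':
--             lex.append(' ')
--         else:
--             lex.append(c)
--     spaced_s = ''.join(lex)
--     return [int(x) for x in spaced_s.split()]
-- ===== SOURCE B (Python) =====
-- def get_newick_order(s):
--     """
--     Extract a permutation from a newick string.
--     @param s: a newick string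
--     @return: a permutation of the first N nonnegative integers
--     """
--     result = []
--     buf = ''
--     for c in s:
--         if '0' <= c <= '9':
--             buf += c
--         else:
--             if buf:
--                 result.append(int(buf))
--                 buf = ''
--     if buf:
--         result.append(int(buf))
--     return result
-- ===== Notes on version B (the rewrite author's own statement) =====
-- stated objective: alternative
-- what changed: Replaced the map-every-char-to-space / join / split / re-parse pipeline with a single left-to-right pass that accumulates digit runs in a token buffer and parses each run as it closes.
import Mathlib
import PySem

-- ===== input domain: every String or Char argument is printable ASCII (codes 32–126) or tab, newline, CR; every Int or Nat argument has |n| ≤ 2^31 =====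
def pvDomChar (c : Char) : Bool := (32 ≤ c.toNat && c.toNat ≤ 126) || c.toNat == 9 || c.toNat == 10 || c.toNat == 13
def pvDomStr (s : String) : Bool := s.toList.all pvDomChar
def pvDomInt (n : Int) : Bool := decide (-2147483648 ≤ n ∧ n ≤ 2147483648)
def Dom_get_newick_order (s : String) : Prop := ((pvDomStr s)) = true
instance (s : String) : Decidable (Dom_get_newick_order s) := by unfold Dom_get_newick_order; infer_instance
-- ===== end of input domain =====

-- B replaces A's map-to-space/join/split/parse pipeline with a single incremental tokenizing
-- pass over the characters (objective: alternative decomposition, same asymptotic cost).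

-- ===== PORT A =====
-- A: replace every non-digit by a space, join, split on whitespace, int-parse each piece.
-- int() can never fail here (every piece is a nonempty digit run), so getD 0 is exact.
def get_newick_order (s : String) : List Int :=
  let lex : List Char :=
    s.toList.foldl
      (fun lex c =>
        if ("0123456789".toList.contains c) = false then lex ++ [' '] else lex ++ [c])
      []
  let spaced_s : List Char := lex   -- ''.join(lex): a list of single chars joins to itself
  (PySem.Chars.split₀ spaced_s).map (fun x => (PySem.Int.ofChars? x).getD 0)

-- ===== PORT B =====
-- flush the token buffer: `if buf: result.append(int(buf))` (int() exact: nonempty digit run)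
def pvAltFlush (res : List Int) (buf : List Char) : List Int :=
  if buf.isEmpty then res else res ++ [(PySem.Int.ofChars? buf).getD 0]

def pvAltStep (st : List Int × List Char) (c : Char) : List Int × List Char :=
  if '0' ≤ c ∧ c ≤ '9' then (st.1, st.2 ++ [c]) else (pvAltFlush st.1 st.2, [])

def get_newick_order_alt (s : String) : List Int :=
  let st := s.toList.foldl pvAltStep ([], [])
  pvAltFlush st.1 st.2

-- ===== PRECONDITION & SPEC =====
def Spec_get_newick_order (s : String) (out : List Int) : Prop := out = get_newick_order_alt s
instance (s : String) (out : List Int) : Decidable (Spec_get_newick_order s out) := by unfold Spec_get_newick_order; infer_instance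

-- ===== CLAIM (what is proved, stated in full; the proofs are below) =====
def Claim_equal_get_newick_order : Prop := ∀ (s : String), Dom_get_newick_order s → Spec_get_newick_order s (get_newick_order s)

-- ===== LEMMAS AND PROOFS =====

-- A's digit-membership test agrees with B's range test
lemma pv_digit_iff (c : Char) :
    ("0123456789".toList.contains c = true) ↔ ('0' ≤ c ∧ c ≤ '9') := by
  have hlist : "0123456789".toList = ['0','1','2','3','4','5','6','7','8','9'] := rfl
  rw [hlist]
  constructor
  · intro h
    have hmem : c ∈ (['0','1','2','3','4','5','6','7','8','9'] : List Char) := by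
      simpa using h
    simp only [List.mem_cons, List.not_mem_nil, or_false] at hmem
    rcases hmem with h|h|h|h|h|h|h|h|h|h <;> subst h <;> exact ⟨by decide, by decide⟩
  · rintro ⟨h1, h2⟩
    have h1' : 48 ≤ c.toNat := h1
    have h2' : c.toNat ≤ 57 := h2
    have hofn : Char.ofNat c.toNat = c := Char.ofNat_toNat c
    have hn : c.toNat = 48 ∨ c.toNat = 49 ∨ c.toNat = 50 ∨ c.toNat = 51 ∨ c.toNat = 52 ∨
        c.toNat = 53 ∨ c.toNat = 54 ∨ c.toNat = 55 ∨ c.toNat = 56 ∨ c.toNat = 57 := by omega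
    rcases hn with h|h|h|h|h|h|h|h|h|h <;>
      · rw [h] at hofn
        rw [← hofn]
        decide

lemma pv_digit_not_space (c : Char) (h1 : '0' ≤ c) (h2 : c ≤ '9') :
    PySem.Chars.isspace c = false := by
  have h1' : 48 ≤ c.toNat := h1
  have h2' : c.toNat ≤ 57 := h2
  simp [PySem.Chars.isspace]
  omega

-- accumulator lemma for the library's split₀ loop
lemma pv_go_acc (cs : List Char) (cur : List Char) (acc : List (List Char)) :
    PySem.Chars.split₀.go cs cur acc = acc.reverse ++ PySem.Chars.split₀.go cs cur [] := by
  induction cs generalizing cur acc with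
  | nil => simp [PySem.Chars.split₀.go]; split <;> simp
  | cons c rest ih =>
    simp only [PySem.Chars.split₀.go]
    split
    · split
      · exact ih [] acc
      · rw [ih [] (cur.reverse :: acc), ih [] [cur.reverse]]; simp
    · exact ih (c :: cur) acc

def pvMapChar (c : Char) : Char :=
  if ("0123456789".toList.contains c) = false then ' ' else c

lemma pv_lex_eq_map (s : List Char) :
    s.foldl (fun lex c =>
        if ("0123456789".toList.contains c) = false then lex ++ [' '] else lex ++ [c]) []
      = s.map pvMapChar := by
  have : ∀ (t : List Char) (acc : List Char),
      t.foldl (fun lex c =>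
        if ("0123456789".toList.contains c) = false then lex ++ [' '] else lex ++ [c]) acc
        = acc ++ t.map pvMapChar := by
    intro t
    induction t with
    | nil => intro acc; simp
    | cons c rest ih =>
      intro acc
      simp only [List.foldl, List.map]
      rw [pvMapChar]
      split <;> rw [ih] <;> simp
  simpa using this s []

-- the joint invariant: B's loop state (res, buf) tracks A's split₀ loop on the mapped tail
lemma pv_main (cs : List Char) (res : List Int) (buf : List Char) :
    (let st := cs.foldl pvAltStep (res, buf); pvAltFlush st.1 st.2)
      = res ++ (PySem.Chars.split₀.go (cs.map pvMapChar) buf.reverse []).map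
          (fun x => (PySem.Int.ofChars? x).getD 0) := by
  induction cs generalizing res buf with
  | nil =>
    simp only [List.foldl, List.map, PySem.Chars.split₀.go, pvAltFlush]
    by_cases h : buf.isEmpty
    · simp_all
    · have : buf.reverse.isEmpty = false := by
        simp_all
      simp [h, this]
  | cons c rest ih =>
    simp only [List.foldl, List.map, pvAltStep]
    by_cases hd : '0' ≤ c ∧ c ≤ '9'
    · have hcon : ("0123456789".toList.contains c) = true := (pv_digit_iff c).mpr hd
      have hm : pvMapChar c = c := by unfold pvMapChar; rw [hcon]; simp
      have hs : PySem.Chars.isspace c = false := pv_digit_not_space c hd.1 hd.2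
      simp only [hd, hm]
      rw [ih]
      simp only [PySem.Chars.split₀.go, hs]
      simp
    · have hcon : ("0123456789".toList.contains c) = false := by
        cases hcb : ("0123456789".toList.contains c) with
        | false => rfl
        | true => exact absurd ((pv_digit_iff c).mp hcb) hd
      have hm : pvMapChar c = ' ' := by unfold pvMapChar; rw [hcon]; simp
      simp only [hd, if_false, hm]
      rw [ih]
      simp only [PySem.Chars.split₀.go]
      have hsp : PySem.Chars.isspace ' ' = true := by decide
      rw [hsp]
      simp only [if_true]
      by_cases h : buf.isEmpty
      · have hb : buf = [] := by simpa [List.isEmpty_iff] using h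
        simp [pvAltFlush, hb]
      · have hb : buf ≠ [] := by simpa [List.isEmpty_iff] using h
        rw [if_neg (by simp [List.isEmpty_iff, hb])]
        rw [pv_go_acc _ [] [buf.reverse.reverse]]
        simp [pvAltFlush, h, List.append_assoc]

-- ===== VERDICT (by name: the statement is the Claim_ definition above) =====
theorem get_newick_order_spec : Claim_equal_get_newick_order := by
  intro s _
  unfold Spec_get_newick_order get_newick_order get_newick_order_alt
  rw [pv_lex_eq_map]
  have := pv_main s.toList [] []
  simp only [List.nil_append] at this
  simpa [PySem.Chars.split₀] using this.symm
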